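-- pv_equiv track=rewrite | github.com/farhad06/Problem-Solve-With-Python | Array/Finding_repeating_element.py | repeateElement
-- ===== SOURCE A (Python) =====
-- def repeateElement(arr):
--     n=len(arr)
--     ele=[]
--
--     for i in range(n-1):
--         for j in range(i+1,n):
--             if arr[i]==arr[j]:
--                 ele.append(arr[i])
--     return ele
-- ===== SOURCE B (Python) =====
-- def repeateElement(arr):
--     remaining = {}
--     for x in arr:
--         remaining[x] = remaining.get(x, 0) + 1
--     ele = []
--     for x in arr:
--         remaining[x] -= 1
--         ele += [x] * remaining[x]
--     return ele
-- ===== Notes on version B (the rewrite author's own statement) =====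
-- stated objective: faster
-- what changed: Replaced A's nested all-pairs index scan by two linear passes: one pass builds a dict of occurrence counts, a second pass decrements the count at each element and emits that many copies.
import Mathlib
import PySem

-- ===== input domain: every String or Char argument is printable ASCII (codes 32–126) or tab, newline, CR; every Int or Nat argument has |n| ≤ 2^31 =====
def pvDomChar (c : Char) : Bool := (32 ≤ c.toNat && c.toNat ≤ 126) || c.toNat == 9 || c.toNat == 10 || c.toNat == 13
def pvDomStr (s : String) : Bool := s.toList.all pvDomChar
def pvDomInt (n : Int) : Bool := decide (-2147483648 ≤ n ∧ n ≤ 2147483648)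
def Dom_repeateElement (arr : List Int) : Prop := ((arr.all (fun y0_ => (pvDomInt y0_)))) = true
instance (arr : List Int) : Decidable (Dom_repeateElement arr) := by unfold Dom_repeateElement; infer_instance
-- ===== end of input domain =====

-- B replaces A's O(n^2) all-pairs scan by one counting pass plus one emitting pass (O(n + output)).

-- ===== PORT A =====
def repeateElement (arr : List Int) : List Int :=
  let n : Int := (arr.length : Int)
  (PySem.List.pyRange 0 (n - 1)).foldl
    (fun ele i =>
      (PySem.List.pyRange (i + 1) n).foldl
        (fun ele j =>
          if PySem.List.pyGetD arr i 0 = PySem.List.pyGetD arr j 0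
          then ele ++ [PySem.List.pyGetD arr i 0] else ele)
        ele)
    []

-- ===== PORT B =====
def repeateElement_alt (arr : List Int) : List Int :=
  let remaining : PySem.Dict Int Int :=
    arr.foldl (fun d x => d.insert x (d.getD x 0 + 1)) PySem.Dict.empty
  (arr.foldl
    (fun st x =>
      let d := st.1.modify x 0 (fun v => v - 1)
      (d, st.2 ++ List.replicate (d.getD x 0).toNat x))
    (remaining, ([] : List Int))).2

-- ===== PRECONDITION & SPEC =====
def Spec_repeateElement (arr : List Int) (out : List Int) : Prop := out = repeateElement_alt arr
instance (arr : List Int) (out : List Int) : Decidable (Spec_repeateElement arr out) := by unfold Spec_repeateElement; infer_instance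

-- ===== CLAIM (what is proved, stated in full; the proofs are below) =====
def Claim_equal_repeateElement : Prop := ∀ (arr : List Int), Dom_repeateElement arr → Spec_repeateElement arr (repeateElement arr)

-- ===== LEMMAS AND PROOFS =====

-- common characterisation: for each element, the duplicates it pairs with to its right
def pvSpecRep : List Int → List Int
  | [] => []
  | x :: xs => List.replicate (xs.count x) x ++ pvSpecRep xs

-- A's inner j-loop over a plain list: appends one copy of a per equal element
lemma pv_inner_eq (a : Int) (l acc : List Int) :
    l.foldl (fun acc y => if a = y then acc ++ [a] else acc) acc
      = acc ++ List.replicate (l.count a) a := by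
  induction l generalizing acc with
  | nil => simp
  | cons y l ih =>
    by_cases h : a = y
    · subst h
      simp only [List.foldl_cons, List.count_cons_self, ih,
        List.replicate_succ]
      simp [List.append_assoc]
    · simp [List.foldl_cons, if_neg h, ih, Ne.symm h]

-- A's inner loop over the index range i+1 .. len
lemma pv_innerloop (arr : List Int) (i : Int) (hi : 0 ≤ i) (ele : List Int) :
    (PySem.List.pyRange (i + 1) (arr.length : Int)).foldl
        (fun ele j =>
          if PySem.List.pyGetD arr i 0 = PySem.List.pyGetD arr j 0
          then ele ++ [PySem.List.pyGetD arr i 0] else ele) ele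
      = ele ++ List.replicate ((arr.drop (i + 1).toNat).count (PySem.List.pyGetD arr i 0))
          (PySem.List.pyGetD arr i 0) := by
  rw [PySem.List.foldl_pyRange_pyGetD' arr 0
    (fun acc y => if PySem.List.pyGetD arr i 0 = y then acc ++ [PySem.List.pyGetD arr i 0] else acc)
    ele (by omega)]
  exact pv_inner_eq _ _ _

-- the per-index block
def pvBlock (arr : List Int) (i : Int) : List Int :=
  List.replicate ((arr.drop (i + 1).toNat).count (PySem.List.pyGetD arr i 0))
    (PySem.List.pyGetD arr i 0)

lemma pv_flat_spec : ∀ (arr : List Int),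
    (List.range arr.length).flatMap (fun k : Nat => pvBlock arr (↑k)) = pvSpecRep arr := by
  intro arr
  induction arr with
  | nil => simp [pvSpecRep]
  | cons x xs ih =>
    have hshift : (fun k : Nat => pvBlock (x :: xs) (↑(k + 1)))
        = (fun k : Nat => pvBlock xs (↑k)) := by
      funext k
      unfold pvBlock
      have h1 : (((k + 1 : Nat) : Int) + 1).toNat = k + 2 := by omega
      have h2 : (((k : Nat) : Int) + 1).toNat = k + 1 := by omega
      rw [h1, h2]
      rw [PySem.List.pyGetD_natCast, PySem.List.pyGetD_natCast]
      simp [List.getD]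
    rw [List.length_cons, List.range_succ_eq_map, List.flatMap_cons, List.flatMap_map]
    have : (fun k : Nat => pvBlock (x :: xs) (↑(k + 1))) = (fun k : Nat => pvBlock xs (↑k)) := hshift
    simp only [Nat.succ_eq_add_one] at *
    rw [show (fun a : Nat => pvBlock (x :: xs) (↑(a + 1))) = (fun k : Nat => pvBlock xs (↑k)) from hshift, ih]
    have hhead : pvBlock (x :: xs) ((0 : Nat) : Int) = List.replicate (xs.count x) x := by
      unfold pvBlock
      norm_num [PySem.List.pyGetD_zero_cons]
    rw [hhead]
    rfl

lemma pv_A_eq (arr : List Int) : repeateElement arr = pvSpecRep arr := by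
  unfold repeateElement
  have hcong : (PySem.List.pyRange 0 ((arr.length : Int) - 1)).foldl
      (fun ele i =>
        (PySem.List.pyRange (i + 1) (arr.length : Int)).foldl
          (fun ele j =>
            if PySem.List.pyGetD arr i 0 = PySem.List.pyGetD arr j 0
            then ele ++ [PySem.List.pyGetD arr i 0] else ele) ele) []
      = (PySem.List.pyRange 0 ((arr.length : Int) - 1)).foldl
          (fun ele i => ele ++ pvBlock arr i) [] := by
    apply PySem.List.foldl_congr_mem
    intro acc i hmem
    have hi : 0 ≤ i := ((PySem.List.mem_pyRange_one).1 hmem).1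
    exact pv_innerloop arr i hi acc
  rw [hcong, PySem.List.foldl_append_eq_flatMap]
  -- extend the range 0..n-2 to 0..n-1 (the added last block is empty)
  have hext : (PySem.List.pyRange 0 ((arr.length : Int) - 1)).flatMap (pvBlock arr)
      = (PySem.List.pyRange 0 (arr.length : Int)).flatMap (pvBlock arr) := by
    cases arr with
    | nil => simp [PySem.List.pyRange_one_eq_nil]
    | cons x xs =>
      have hlen : (((x :: xs).length : Int)) = (xs.length : Int) + 1 := by
        simp
      rw [hlen]
      simp only [add_sub_cancel_right]
      rw [PySem.List.pyRange_one_succ_right (by omega : (0:Int) ≤ (xs.length : Int))]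
      have hlast : pvBlock (x :: xs) (xs.length : Int) = [] := by
        unfold pvBlock
        have : ((xs.length : Int) + 1).toNat = xs.length + 1 := by omega
        rw [this]
        simp
      simp [List.flatMap_append, hlast]
  rw [List.nil_append, hext, PySem.List.pyRange_zero_nat, List.flatMap_map]
  exact pv_flat_spec arr

-- B's emitting loop: if the dict holds the multiplicities of the remaining list, the loop emits pvSpecRep
lemma pv_alt_loop : ∀ (l : List Int) (d : PySem.Dict Int Int) (acc : List Int),
    (∀ x : Int, d.getD x 0 = (l.count x : Int)) →
    (l.foldl
      (fun st x =>
        let d := st.1.modify x 0 (fun v => v - 1)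
        (d, st.2 ++ List.replicate (d.getD x 0).toNat x))
      (d, acc)).2 = acc ++ pvSpecRep l := by
  intro l
  induction l with
  | nil => intro d acc _; simp [pvSpecRep]
  | cons x xs ih =>
    intro d acc h
    have hx : (d.modify x 0 (fun v => v - 1)).getD x 0 = (xs.count x : Int) := by
      rw [PySem.Dict.getD_modify_self, h x]
      simp [List.count_cons_self]
    have hrest : ∀ y : Int, (d.modify x 0 (fun v => v - 1)).getD y 0 = (xs.count y : Int) := by
      intro y
      rw [PySem.Dict.getD_modify]
      by_cases hy : y = x
      · subst hy; rw [if_pos rfl, h y]; simp [List.count_cons_self]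
      · rw [if_neg hy, h y, List.count_cons_of_ne (fun hh => hy hh.symm)]
    simp only [List.foldl_cons]
    rw [ih _ _ hrest]
    have : ((d.modify x 0 (fun v => v - 1)).getD x 0).toNat = xs.count x := by
      rw [hx]; omega
    rw [this]
    simp [pvSpecRep, List.append_assoc]

lemma pv_B_eq (arr : List Int) : repeateElement_alt arr = pvSpecRep arr := by
  unfold repeateElement_alt
  rw [pv_alt_loop arr _ [] (fun x => by
    rw [PySem.Dict.getD_foldl_insert_add_one]
    simp)]
  simp

-- ===== VERDICT (by name: the statement is the Claim_ definition above) =====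
theorem repeateElement_spec : Claim_equal_repeateElement := by
  intro arr _
  unfold Spec_repeateElement
  rw [pv_A_eq, pv_B_eq]
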